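-- pv_equiv track=rewrite | github.com/jdeeps/programmingpractice | geeksforgeeks/python/matchingpair.py | find
-- ===== SOURCE A (Python) =====
-- def find (N):
--     # create a list with the elements ranging from 1 to N
--     # example - for N=1, it will create a list {1} and then extend itself to create {1,1}
--     list = []
--     for i in range(1,N+1):
--         list.append(i)
--     list.extend(list)
--     # following lines of code will iterate 'list' and simultaneously add it to 'matching_list'.
--     # If the same element is found in the 'matching_list' then it will return the number of times it picked to get a matching pair
--     matching_list =[]
--     for i in range(0,len(list)):
--         if list[i] in matching_list:
--            return i+1
--         matching_list.append(list[i])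
--     # Above for loop possibly was taking more time to execute for bigger inputs. I got time error while executing that in GEEKSforGEEKS platform
--     # Hence, the above code was replaced with the following and it worked.
--     # However, see that it will work only if our list goes in a sequence as I am only maching the first element.
--     # Code replacement for - LOC : 17-21
--     for i in range(1,len(list)):
--          if list[0] == list[i]:
--            return i+1
-- ===== SOURCE B (Python) =====
-- def find(N):
--     # Closed form: the list [1..N]+[1..N] has its first repeat at index N
--     # (element 1), so the loop picks N+1 items; for N < 1 nothing is picked.
--     if N >= 1:
--         return N + 1
--     return None
-- ===== Notes on version B (the rewrite author's own statement) =====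
-- stated objective: faster
-- what changed: Replaced building the duplicated list and the quadratic membership scan with the closed form N+1 for N>=1 (None otherwise), since the first repeat in [1..N]+[1..N] is always at index N.
import Mathlib
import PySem

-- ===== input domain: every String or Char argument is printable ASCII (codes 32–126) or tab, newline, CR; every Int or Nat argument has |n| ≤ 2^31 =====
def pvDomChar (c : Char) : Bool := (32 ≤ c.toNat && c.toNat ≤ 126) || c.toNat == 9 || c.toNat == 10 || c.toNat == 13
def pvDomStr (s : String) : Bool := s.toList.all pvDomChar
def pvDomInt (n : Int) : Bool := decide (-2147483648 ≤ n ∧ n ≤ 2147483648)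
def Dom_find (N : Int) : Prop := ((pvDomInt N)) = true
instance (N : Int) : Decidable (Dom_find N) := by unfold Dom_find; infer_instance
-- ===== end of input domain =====

-- B replaces A's list construction and quadratic membership scan with the closed form N+1 (faster, O(1)).


-- ===== PORT A =====
-- second loop of A: walk the list, keeping the 'matching_list' seen so far and the running index i
def findScan (rest : List Int) (matching : List Int) (i : Int) : Option Int :=
  match rest with
  | [] => none
  | x :: xs => if x ∈ matching then some (i + 1) else findScan xs (matching ++ [x]) (i + 1)

-- third loop of A: compare list[0] with list[i] for i = 1 .. len-1
def findScan0 (first : Int) (rest : List Int) (i : Int) : Option Int :=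
  match rest with
  | [] => none
  | x :: xs => if first == x then some (i + 1) else findScan0 first xs (i + 1)

def find (N : Int) : Option Int :=
  let l := (PySem.List.pyRange 1 (N + 1) 1).foldl (fun acc i => acc ++ [i]) []
  let lst := l ++ l
  match findScan lst [] 0 with
  | some r => some r
  | none =>
    match lst with
    | [] => none
    | x :: xs => findScan0 x xs 1

-- ===== PORT B =====
def find_alt (N : Int) : Option Int :=
  if N ≥ 1 then some (N + 1) else none

-- ===== PRECONDITION & SPEC =====
def Spec_find (N : Int) (out : Option Int) : Prop := out = find_alt N
instance (N : Int) (out : Option Int) : Decidable (Spec_find N out) := by unfold Spec_find; infer_instance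

-- ===== CLAIM (what is proved, stated in full; the proofs are below) =====
def Claim_equal_find : Prop := ∀ (N : Int), Dom_find N → Spec_find N (find N)

-- ===== LEMMAS AND PROOFS =====

theorem foldl_append_singleton (l acc : List Int) :
    l.foldl (fun acc i => acc ++ [i]) acc = acc ++ l := by
  induction l generalizing acc with
  | nil => simp
  | cons x xs ih => simp [List.foldl, ih]

-- scanning a block L that is fresh w.r.t. 'matching' (and nodup) skips it entirely
theorem findScan_skip (L : List Int) (tail matching : List Int) (i : Int)
    (h : (matching ++ L).Nodup) :
    findScan (L ++ tail) matching i = findScan tail (matching ++ L) (i + L.length) := by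
  induction L generalizing matching i with
  | nil => simp
  | cons x xs ih =>
    have hd := (List.nodup_append.mp h).2.2
    have hx : x ∉ matching := fun hmem => hd x hmem x (List.mem_cons_self) rfl
    have h' : ((matching ++ [x]) ++ xs).Nodup := by
      simpa [List.append_assoc] using h
    rw [List.cons_append, findScan, if_neg hx, ih (matching ++ [x]) (i + 1) h']
    have : i + 1 + (xs.length : Int) = i + ((x :: xs).length : Int) := by
      simp; ring
    rw [List.append_assoc, this]
    rfl

theorem findScan_hit (L : List Int) (x : Int) (i : Int) (hx : x ∈ L) (rest : List Int) :
    findScan (x :: rest) L i = some (i + 1) := by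
  simp [findScan, hx]

-- ===== VERDICT (by name: the statement is the Claim_ definition above) =====
theorem find_spec : Claim_equal_find := by
  intro N _
  unfold Spec_find find find_alt
  simp only [foldl_append_singleton, List.nil_append]
  by_cases hN : N ≥ 1
  · -- L = [1, …, N] is nonempty and nodup; first repeat is at index L.length
    set L := PySem.List.pyRange 1 (N + 1) 1 with hL
    have hnodup : L.Nodup := PySem.List.nodup_pyRange_one 1 (N + 1)
    have hnodup' : (([] : List Int) ++ L).Nodup := by simpa using hnodup
    have hcons : L = 1 :: PySem.List.pyRange 2 (N + 1) 1 := by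
      rw [hL]
      exact PySem.List.pyRange_one_cons (by omega)
    rw [findScan_skip L L [] 0 hnodup']
    simp only [List.nil_append]
    conv_lhs => rw [hcons]
    rw [findScan_hit (1 :: PySem.List.pyRange 2 (N + 1) 1) 1
      (0 + (((1 : Int) :: PySem.List.pyRange 2 (N + 1) 1).length : Int))
      List.mem_cons_self (PySem.List.pyRange 2 (N + 1) 1)]
    simp [hN]
    omega
  · have hnil : PySem.List.pyRange 1 (N + 1) 1 = [] :=
      PySem.List.pyRange_one_eq_nil (by omega)
    simp [hnil, findScan, hN]
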